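-- pv_equiv track=rewrite | github.com/JahdyM/life-dashboard | app.py | build_hourly_schedule_rows
-- ===== SOURCE A (Python) =====
-- def build_hourly_schedule_rows(items):
--     all_day = [item["title"] for item in items if item.get("time") is None]
--     rows = []
--     if all_day:
--         rows.append({"Hour": "All day", "Scheduled": " | ".join(all_day)})
--     for hour in range(6, 23):
--         hour_key = f"{hour:02d}:00"
--         bucket = []
--         for item in items:
--             item_time = item.get("time")
--             if not item_time:
--                 continue
--             if item_time[:2] == f"{hour:02d}":
--                 bucket.append(item["title"])
--         rows.append({"Hour": hour_key, "Scheduled": " | ".join(bucket) if bucket else ""})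
--     return rows
-- ===== SOURCE B (Python) =====
-- HOURS = [f"{h:02d}" for h in range(6, 23)]
--
-- def build_hourly_schedule_rows(items):
--     # One grouping pass over items, then a fixed emit loop (instead of rescanning items per hour).
--     all_day = []
--     buckets = {}
--     for item in items:
--         t = item.get("time")
--         if t is None:
--             all_day.append(item["title"])
--         elif t and t[:2] in HOURS:
--             buckets.setdefault(t[:2], []).append(item["title"])
--     rows = []
--     if all_day:
--         rows.append({"Hour": "All day", "Scheduled": " | ".join(all_day)})
--     for key in HOURS:
--         rows.append({"Hour": key + ":00", "Scheduled": " | ".join(buckets.get(key, []))})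
--     return rows
-- ===== Notes on version B (the rewrite author's own statement) =====
-- stated objective: faster
-- what changed: Replaces A's 17 full rescans of items (one per hour) with a single grouping pass into a dict keyed by the 2-char hour prefix, followed by a fixed 17-row emit loop with O(1) lookups.
import Mathlib
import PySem

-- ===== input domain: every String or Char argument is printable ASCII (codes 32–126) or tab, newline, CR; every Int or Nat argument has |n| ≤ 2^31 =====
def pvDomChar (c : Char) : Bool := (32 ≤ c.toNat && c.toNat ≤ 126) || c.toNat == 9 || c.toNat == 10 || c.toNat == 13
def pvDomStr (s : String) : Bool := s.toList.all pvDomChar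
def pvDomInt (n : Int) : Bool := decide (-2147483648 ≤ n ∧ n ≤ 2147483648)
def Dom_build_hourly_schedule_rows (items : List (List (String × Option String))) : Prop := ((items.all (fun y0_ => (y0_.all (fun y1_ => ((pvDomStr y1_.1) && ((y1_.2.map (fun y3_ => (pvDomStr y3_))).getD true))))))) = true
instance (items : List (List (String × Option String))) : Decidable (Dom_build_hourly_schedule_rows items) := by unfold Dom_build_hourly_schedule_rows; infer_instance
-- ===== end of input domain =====

-- B replaces A's 17 full rescans of items (one per displayed hour) with a single grouping
-- pass into a dict keyed by the 2-char hour prefix, then a fixed emit loop with O(1) lookups.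


-- shared accessors for the Python dict items: item.get(k) where a missing key and a stored
-- None both read as Python None (hence the Option.join)
def pvLookup (item : List (String × Option String)) (k : String) : Option String :=
  Option.join ((PySem.Dict.ofList item).get? k)

-- item["title"]: under Pre_ the key is present with a string value wherever it is read;
-- Python raises on the (excluded) none case, the port's .getD "" is never reached there
def pvTitle (item : List (String × Option String)) : String :=
  (pvLookup item "title").getD ""

-- f"{hour:02d}" for the hours used (6..22)
def pvHH (hour : Int) : String :=
  (if hour < 10 then "0" else "") ++ PySem.Int.toStr hour

-- ===== PORT A =====
def build_hourly_schedule_rows (items : List (List (String × Option String))) : List (List (String × String)) :=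
  let all_day := items.filterMap (fun item =>
    if pvLookup item "time" = none then some (pvTitle item) else none)
  let rows : List (List (String × String)) :=
    if all_day ≠ [] then [[("Hour", "All day"), ("Scheduled", PySem.Str.join " | " all_day)]] else []
  rows ++ (PySem.List.pyRange 6 23 1).map (fun hour =>
    let hour_key := pvHH hour ++ ":00"
    let bucket := items.foldl (fun b item =>
      match pvLookup item "time" with
      | none => b
      | some t =>
        if t = "" then b
        else if PySem.Str.slice t none (some 2) = pvHH hour then b ++ [pvTitle item] else b) []
    [("Hour", hour_key), ("Scheduled", if bucket ≠ [] then PySem.Str.join " | " bucket else "")])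

-- ===== PORT B =====
def pvHOURS : List String := (PySem.List.pyRange 6 23 1).map pvHH

-- the loop body, named: buckets.setdefault(k, []).append(x) is ported as Dict.modify k [] (· ++ [x])
def pvStepB (st : List String × PySem.Dict String (List String))
    (item : List (String × Option String)) : List String × PySem.Dict String (List String) :=
  match pvLookup item "time" with
  | none => (st.1 ++ [pvTitle item], st.2)
  | some t =>
    if t ≠ "" ∧ PySem.Str.slice t none (some 2) ∈ pvHOURS then
      (st.1, st.2.modify (PySem.Str.slice t none (some 2)) [] (· ++ [pvTitle item]))
    else st

def build_hourly_schedule_rows_alt (items : List (List (String × Option String))) : List (List (String × String)) :=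
  let st := items.foldl pvStepB ([], PySem.Dict.empty)
  (if st.1 ≠ [] then [[("Hour", "All day"), ("Scheduled", PySem.Str.join " | " st.1)]] else []) ++
  pvHOURS.map (fun key =>
    [("Hour", key ++ ":00"), ("Scheduled", PySem.Str.join " | " (st.2.getD key []))])

-- ===== PRECONDITION & SPEC =====
-- Pre_ = exactly the inputs where Python A returns: every item whose title A reads
-- (time is None, or a truthy time whose 2-char prefix is a displayed hour 06..22)
-- must carry a non-None "title" value; otherwise A raises KeyError/TypeError.
def Pre_build_hourly_schedule_rows (items : List (List (String × Option String))) : Prop :=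
  ∀ item ∈ items,
    (pvLookup item "time" = none ∨
      ∃ t, pvLookup item "time" = some t ∧ t ≠ "" ∧ PySem.Str.slice t none (some 2) ∈ pvHOURS) →
    (pvLookup item "title").isSome = true
instance (items : List (List (String × Option String))) : Decidable (Pre_build_hourly_schedule_rows items) := by
  unfold Pre_build_hourly_schedule_rows
  refine List.decidableBAll _ items
def pvWitness_build_hourly_schedule_rows : (List (List (String × Option String))) :=
  [[("title", some "Gym"), ("time", some "07:30")], [("title", some "Rest")], [("title", some "x"), ("time", none)]]

def Spec_build_hourly_schedule_rows (items : List (List (String × Option String))) (out : List (List (String × String))) : Prop := out = build_hourly_schedule_rows_alt items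
instance (items : List (List (String × Option String))) (out : List (List (String × String))) : Decidable (Spec_build_hourly_schedule_rows items out) := by unfold Spec_build_hourly_schedule_rows; infer_instance

-- ===== CLAIM (what is proved, stated in full; the proofs are below) =====
def Claim_equal_build_hourly_schedule_rows : Prop := ∀ (items : List (List (String × Option String))), Dom_build_hourly_schedule_rows items → Pre_build_hourly_schedule_rows items → Spec_build_hourly_schedule_rows items (build_hourly_schedule_rows items)

-- ===== LEMMAS AND PROOFS =====

-- the per-hour bucket both versions compute, as a filterMap
def pvBucket (k : String) (items : List (List (String × Option String))) : List String :=
  items.filterMap (fun item =>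
    match pvLookup item "time" with
    | none => none
    | some t =>
      if t = "" then none
      else if PySem.Str.slice t none (some 2) = k then some (pvTitle item) else none)

lemma bucketA_eq (k : String) (items : List (List (String × Option String))) (b : List String) :
    items.foldl (fun b item =>
      match pvLookup item "time" with
      | none => b
      | some t =>
        if t = "" then b
        else if PySem.Str.slice t none (some 2) = k then b ++ [pvTitle item] else b) b
    = b ++ pvBucket k items := by
  induction items generalizing b with
  | nil => simp [pvBucket]
  | cons item rest ih =>
    simp only [List.foldl_cons, pvBucket, List.filterMap_cons]
    cases h : pvLookup item "time" with
    | none => simpa [pvBucket] using ih b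
    | some t =>
      by_cases h0 : t = ""
      · simpa [h0, pvBucket] using ih b
      · by_cases hk : PySem.Str.slice t none (some 2) = k
        · simpa [h0, hk, pvBucket] using ih (b ++ [pvTitle item])
        · simpa [h0, hk, pvBucket] using ih b

lemma foldB_fst (items : List (List (String × Option String)))
    (l : List String) (d : PySem.Dict String (List String)) :
    (items.foldl pvStepB (l, d)).1
      = l ++ items.filterMap (fun item =>
          if pvLookup item "time" = none then some (pvTitle item) else none) := by
  induction items generalizing l d with
  | nil => simp
  | cons item rest ih =>
    simp only [List.foldl_cons, List.filterMap_cons]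
    cases h : pvLookup item "time" with
    | none =>
      have hstep : pvStepB (l, d) item = (l ++ [pvTitle item], d) := by simp [pvStepB, h]
      rw [hstep, ih]
      simp
    | some t =>
      by_cases hc : t ≠ "" ∧ PySem.Str.slice t none (some 2) ∈ pvHOURS
      · have hstep : pvStepB (l, d) item
            = (l, d.modify (PySem.Str.slice t none (some 2)) [] (· ++ [pvTitle item])) := by
          simp [pvStepB, h, hc.1, hc.2]
        rw [hstep, ih]
        simp
      · have hstep : pvStepB (l, d) item = (l, d) := by simp [pvStepB, h, hc]
        rw [hstep, ih]
        simp

lemma foldB_snd (items : List (List (String × Option String)))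
    (k : String) (hk : k ∈ pvHOURS)
    (l : List String) (d : PySem.Dict String (List String)) :
    (items.foldl pvStepB (l, d)).2.getD k [] = d.getD k [] ++ pvBucket k items := by
  induction items generalizing l d with
  | nil => simp [pvBucket]
  | cons item rest ih =>
    simp only [List.foldl_cons, pvBucket, List.filterMap_cons]
    cases h : pvLookup item "time" with
    | none =>
      have hstep : pvStepB (l, d) item = (l ++ [pvTitle item], d) := by simp [pvStepB, h]
      rw [hstep]
      simpa [pvBucket] using ih (l ++ [pvTitle item]) d
    | some t =>
      by_cases h0 : t = ""
      · have hstep : pvStepB (l, d) item = (l, d) := by simp [pvStepB, h, h0]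
        rw [hstep]
        simpa [h0, pvBucket] using ih l d
      · by_cases hmem : PySem.Str.slice t none (some 2) ∈ pvHOURS
        · have hstep : pvStepB (l, d) item
              = (l, d.modify (PySem.Str.slice t none (some 2)) [] (· ++ [pvTitle item])) := by
            simp [pvStepB, h, h0, hmem]
          rw [hstep]
          by_cases hke : PySem.Str.slice t none (some 2) = k
          · rw [ih l (d.modify (PySem.Str.slice t none (some 2)) [] (· ++ [pvTitle item]))]
            simp [h0, hke, pvBucket]
          · rw [ih l (d.modify (PySem.Str.slice t none (some 2)) [] (· ++ [pvTitle item]))]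
            simp only [PySem.Dict.getD_modify]
            simp [h0, hke, Ne.symm hke, pvBucket]
        · have hstep : pvStepB (l, d) item = (l, d) := by simp [pvStepB, h, hmem]
          have hke : PySem.Str.slice t none (some 2) ≠ k := fun he => hmem (he ▸ hk)
          rw [hstep]
          simpa [h0, hke, pvBucket] using ih l d

lemma join_empty_iff (b : List String) :
    (if b ≠ [] then PySem.Str.join " | " b else "") = PySem.Str.join " | " b := by
  cases b with
  | nil => simp [PySem.Str.join]
  | cons x xs => simp

-- ===== VERDICT (by name: the statement is the Claim_ definition above) =====
theorem build_hourly_schedule_rows_spec : Claim_equal_build_hourly_schedule_rows := by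
  intro items _ _
  unfold Spec_build_hourly_schedule_rows build_hourly_schedule_rows build_hourly_schedule_rows_alt
  simp only []
  have hfst := foldB_fst items [] PySem.Dict.empty
  simp only [List.nil_append] at hfst
  rw [hfst]
  congr 1
  unfold pvHOURS
  rw [List.map_map]
  refine List.map_congr_left ?_
  intro hour hmem
  have hk : pvHH hour ∈ pvHOURS := by
    unfold pvHOURS; exact List.mem_map_of_mem hmem
  have hsnd := foldB_snd items (pvHH hour) hk [] PySem.Dict.empty
  rw [bucketA_eq (pvHH hour) items []]
  simp only [Function.comp, hsnd, PySem.Dict.getD_empty, List.nil_append]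
  rw [join_empty_iff]
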